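-- pv_equiv track=rewrite | github.com/Auto-Mech/mechanalyzer | mechanalyzer/plotter/pes.py | _cross_conn
-- ===== SOURCE A (Python) =====
-- def _node_lst(conn, sccs_label=''):
--     """ nx formatted nodes from a single conn
--     """
--     return [(sccs_label + node, {'color': 'green'}) for node in conn]
--
-- def _cross_conn(conns_a, conns_b, a_idx, b_idx):
--     """ find the connections between bimol products and wells
--         of two PESes
--     """
--     conn_lst = ()
--     a_nodes = []
--     b_nodes = []
--     lab_a_nodes = []
--     lab_b_nodes = []
--     sccs_label_a = '{:g}_{:g}!'.format(*a_idx)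
--     sccs_label_b = '{:g}_{:g}!'.format(*b_idx)
--     for conn in conns_a:
--         a_nodes.extend(_node_lst(conn))
--         lab_a_nodes.extend(_node_lst(conn, sccs_label_a))
--     for conn in conns_b:
--         b_nodes.extend(_node_lst(conn))
--         lab_b_nodes.extend(_node_lst(conn, sccs_label_b))
--     for i, a_node in enumerate(a_nodes):
--         a_node = a_node[0].split('+')
--         for j, b_node in enumerate(b_nodes):
--             b_node = b_node[0].split('+')
--             if len(a_node) > len(b_node):
--                 if b_node[0] in a_node:
--                     conn_lst += (
--                         (lab_a_nodes[i][0], lab_b_nodes[j][0]),)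
--             elif len(b_node) > len(a_node):
--                 if a_node[0] in b_node:
--                     conn_lst += (
--                         (lab_a_nodes[i][0], lab_b_nodes[j][0]),)
--     return conn_lst
-- ===== SOURCE B (Python) =====
-- def _cross_conn(conns_a, conns_b, a_idx, b_idx):
--     """ find the connections between bimol products and wells
--         of two PESes (indexed re-implementation)
--     """
--     lab_a = '{:g}_{:g}!'.format(*a_idx)
--     lab_b = '{:g}_{:g}!'.format(*b_idx)
--     a_nodes = [node for conn in conns_a for node in conn]
--     b_nodes = [node for conn in conns_b for node in conn]
--     a_splits = [node.split('+') for node in a_nodes]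
--     # index the a-side once: by contained token and by first token
--     member_a = {}   # token -> ascending i with token in a_splits[i]
--     first_a = {}    # token -> ascending i with a_splits[i][0] == token
--     for i, parts in enumerate(a_splits):
--         for tok in dict.fromkeys(parts):
--             member_a.setdefault(tok, []).append(i)
--         first_a.setdefault(parts[0], []).append(i)
--     matches = [[] for _ in a_nodes]
--     for j, node in enumerate(b_nodes):
--         parts = node.split('+')
--         lb = len(parts)
--         for i in member_a.get(parts[0], []):
--             if len(a_splits[i]) > lb:
--                 matches[i].append(j)
--         for tok in dict.fromkeys(parts):
--             for i in first_a.get(tok, []):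
--                 if len(a_splits[i]) < lb:
--                     matches[i].append(j)
--     return tuple((lab_a + a_nodes[i], lab_b + b_nodes[j])
--                  for i, js in enumerate(matches) for j in js)
-- ===== Notes on version B (the rewrite author's own statement) =====
-- stated objective: faster
-- what changed: Instead of comparing every a-node against every b-node, B builds two dicts over the a-side nodes once (by first token and by contained token), then for each b-node looks up its matching a-indices and collects per-a-node ascending match lists, flattening them at the end.
import Mathlib
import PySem

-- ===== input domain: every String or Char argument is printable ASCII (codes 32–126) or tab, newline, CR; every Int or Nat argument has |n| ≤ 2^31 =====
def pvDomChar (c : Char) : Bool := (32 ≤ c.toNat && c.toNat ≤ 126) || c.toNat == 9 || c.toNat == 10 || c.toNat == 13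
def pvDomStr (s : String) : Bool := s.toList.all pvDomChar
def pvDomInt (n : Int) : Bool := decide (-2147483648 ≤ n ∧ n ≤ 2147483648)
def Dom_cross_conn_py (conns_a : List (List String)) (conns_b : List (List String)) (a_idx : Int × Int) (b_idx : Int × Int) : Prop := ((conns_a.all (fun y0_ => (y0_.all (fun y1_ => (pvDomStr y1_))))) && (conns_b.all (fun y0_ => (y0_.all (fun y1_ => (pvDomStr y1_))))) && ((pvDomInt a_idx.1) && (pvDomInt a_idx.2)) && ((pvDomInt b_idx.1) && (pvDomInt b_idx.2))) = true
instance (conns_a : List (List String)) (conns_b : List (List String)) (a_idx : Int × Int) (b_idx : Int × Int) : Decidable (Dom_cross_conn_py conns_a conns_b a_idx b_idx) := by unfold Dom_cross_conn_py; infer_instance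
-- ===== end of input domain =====

-- B indexes the a-side nodes once by token (first-token and member-token dicts) instead of
-- re-scanning every a-node against every b-node; objective: faster (O(N+M+output) vs O(N*M)).

-- shared helper: exact port of the label formatting '{:g}'.format(n) for an int argument
-- (integer rounding to 6 significant digits, round-half-even; exact for |n| ≤ 2^31)
def pvFmtGStrip (q : Nat) : Nat :=
  if h : q % 10 = 0 ∧ q ≠ 0 then pvFmtGStrip (q / 10) else q
decreasing_by exact Nat.div_lt_self (Nat.pos_of_ne_zero h.2) (by norm_num)

def pvFmtG (n : Int) : String :=
  let sign := if n < 0 then "-" else ""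
  let v := n.natAbs
  let s := PySem.Int.toStr (v : Int)
  if PySem.Str.len s ≤ 6 then sign ++ s
  else
    let d := (PySem.Str.len s).toNat
    let k := d - 6
    let q := v / 10 ^ k
    let r := v % 10 ^ k
    let hf := 5 * 10 ^ (k - 1)
    let q := if hf < r ∨ (r = hf ∧ q % 2 = 1) then q + 1 else q
    let qe := if q = 10 ^ 6 then ((10 ^ 5 : Nat), d) else (q, d - 1)
    let m := pvFmtGStrip qe.1
    let ms := PySem.Int.toStr (m : Int)
    let mant := match ms.toList with
      | [] => ms
      | c :: rest => if rest = [] then ms else String.ofList [c] ++ "." ++ String.ofList rest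
    sign ++ mant ++ "e+" ++ PySem.Str.zfill (PySem.Int.toStr (qe.2 : Int)) 2

-- shared helper: node.split('+') (sep is the literal "+" ≠ "", so split? is always some)
def pvSplit (s : String) : List String := (PySem.Str.split? s "+").getD []

-- ===== PORT A =====
def pvNodeLst (conn : List String) (sccs_label : String) : List (String × PySem.Dict String String) :=
  conn.map (fun node => (sccs_label ++ node, PySem.Dict.ofList [("color", "green")]))

def cross_conn_py (conns_a : List (List String)) (conns_b : List (List String)) (a_idx : Int × Int) (b_idx : Int × Int) : List (String × String) :=
  let sccs_label_a := pvFmtG a_idx.1 ++ "_" ++ pvFmtG a_idx.2 ++ "!"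
  let sccs_label_b := pvFmtG b_idx.1 ++ "_" ++ pvFmtG b_idx.2 ++ "!"
  let ab := conns_a.foldl (fun acc conn => (acc.1 ++ pvNodeLst conn "", acc.2 ++ pvNodeLst conn sccs_label_a))
      (([], []) : List (String × PySem.Dict String String) × List (String × PySem.Dict String String))
  let bb := conns_b.foldl (fun acc conn => (acc.1 ++ pvNodeLst conn "", acc.2 ++ pvNodeLst conn sccs_label_b))
      (([], []) : List (String × PySem.Dict String String) × List (String × PySem.Dict String String))
  (PySem.List.enumerate ab.1).foldl (fun conn_lst ia =>
    let a_node := pvSplit ia.2.1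
    (PySem.List.enumerate bb.1).foldl (fun conn_lst jb =>
      let b_node := pvSplit jb.2.1
      if a_node.length > b_node.length then
        if a_node.contains (PySem.List.pyGetD b_node 0 "") then
          conn_lst ++ [((PySem.List.pyGetD ab.2 ia.1 ("", PySem.Dict.empty)).1,
                        (PySem.List.pyGetD bb.2 jb.1 ("", PySem.Dict.empty)).1)]
        else conn_lst
      else if b_node.length > a_node.length then
        if b_node.contains (PySem.List.pyGetD a_node 0 "") then
          conn_lst ++ [((PySem.List.pyGetD ab.2 ia.1 ("", PySem.Dict.empty)).1,
                        (PySem.List.pyGetD bb.2 jb.1 ("", PySem.Dict.empty)).1)]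
        else conn_lst
      else conn_lst) conn_lst) []

-- ===== PORT B =====
def cross_conn_py_alt (conns_a : List (List String)) (conns_b : List (List String)) (a_idx : Int × Int) (b_idx : Int × Int) : List (String × String) :=
  let lab_a := pvFmtG a_idx.1 ++ "_" ++ pvFmtG a_idx.2 ++ "!"
  let lab_b := pvFmtG b_idx.1 ++ "_" ++ pvFmtG b_idx.2 ++ "!"
  let a_nodes := conns_a.flatMap (fun conn => conn)
  let b_nodes := conns_b.flatMap (fun conn => conn)
  let a_splits := a_nodes.map (fun node => pvSplit node)
  let idx := (PySem.List.enumerate a_splits).foldl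
      (fun st ip =>
        ((PySem.List.dedup ip.2).foldl (fun d tok => d.modify tok [] (· ++ [ip.1])) st.1,
         st.2.modify (PySem.List.pyGetD ip.2 0 "") [] (· ++ [ip.1])))
      ((PySem.Dict.empty, PySem.Dict.empty) : PySem.Dict String (List Int) × PySem.Dict String (List Int))
  let matches0 : List (List Int) := a_nodes.map (fun _ => [])
  let mtchs := (PySem.List.enumerate b_nodes).foldl
      (fun m jn =>
        let parts := pvSplit jn.2
        let lb := parts.length
        let m := (idx.1.getD (PySem.List.pyGetD parts 0 "") []).foldl
            (fun m i => if lb < (PySem.List.pyGetD a_splits i []).length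
                        then PySem.List.pySetD m i (PySem.List.pyGetD m i [] ++ [jn.1]) else m) m
        (PySem.List.dedup parts).foldl
            (fun m tok => (idx.2.getD tok []).foldl
                (fun m i => if (PySem.List.pyGetD a_splits i []).length < lb
                            then PySem.List.pySetD m i (PySem.List.pyGetD m i [] ++ [jn.1]) else m) m) m)
      matches0
  (PySem.List.enumerate mtchs).flatMap
    (fun ijs => ijs.2.map (fun j => (lab_a ++ PySem.List.pyGetD a_nodes ijs.1 "", lab_b ++ PySem.List.pyGetD b_nodes j "")))

-- ===== PRECONDITION & SPEC =====
def Spec_cross_conn_py (conns_a : List (List String)) (conns_b : List (List String)) (a_idx : Int × Int) (b_idx : Int × Int) (out : List (String × String)) : Prop := out = cross_conn_py_alt conns_a conns_b a_idx b_idx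
instance (conns_a : List (List String)) (conns_b : List (List String)) (a_idx : Int × Int) (b_idx : Int × Int) (out : List (String × String)) : Decidable (Spec_cross_conn_py conns_a conns_b a_idx b_idx out) := by unfold Spec_cross_conn_py; infer_instance

-- ===== CLAIM (what is proved, stated in full; the proofs are below) =====
def Claim_equal_cross_conn_py : Prop := ∀ (conns_a : List (List String)) (conns_b : List (List String)) (a_idx : Int × Int) (b_idx : Int × Int), Dom_cross_conn_py conns_a conns_b a_idx b_idx → Spec_cross_conn_py conns_a conns_b a_idx b_idx (cross_conn_py conns_a conns_b a_idx b_idx)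

-- ===== LEMMAS AND PROOFS =====

-- the match condition, on the two node strings only
def pvCond (a b : String) : Bool :=
  let P := pvSplit a
  let S := pvSplit b
  if S.length < P.length then P.contains (PySem.List.pyGetD S 0 "")
  else if P.length < S.length then S.contains (PySem.List.pyGetD P 0 "")
  else false

-- the common normal form both ports are reduced to
def pvNF (la lb : String) (as bs : List String) : List (String × String) :=
  as.flatMap (fun a => ((bs.filter (fun b => pvCond a b)).map (fun b => (la ++ a, lb ++ b))))


theorem pv_flatMap_congr {α β : Type} {l : List α} {f g : α → List β} (h : ∀ x ∈ l, f x = g x) : l.flatMap f = l.flatMap g := by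
  simp only [List.flatMap_def]; rw [List.map_congr_left h]

theorem pv_enum_flatMap {α β : Type} (xs : List α) (G : α → List β) :
    (PySem.List.enumerate xs).flatMap (fun p => G p.2) = xs.flatMap G := by
  conv_rhs => rw [← PySem.List.map_snd_enumerate xs 0]
  rw [List.flatMap_map]

theorem pv_enum_filter_map {α β : Type} (xs : List α) (c : α → Bool) (m : α → β) :
    ((PySem.List.enumerate xs).filter (fun p => c p.2)).map (fun p => m p.2) = (xs.filter c).map m := by
  conv_rhs => rw [← PySem.List.map_snd_enumerate xs 0]
  rw [List.filter_map, List.map_map]; rfl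

def pvD : PySem.Dict String String := PySem.Dict.ofList [("color", "green")]

theorem pv_nodes_eq (conns : List (List String)) (lab : String) :
    conns.flatMap (fun c => pvNodeLst c lab) =
      (conns.flatMap (fun c => c)).map (fun n => (lab ++ n, pvD)) := by
  simp [pvNodeLst, pvD, List.flatMap_def]

theorem pv_lookup (nX : List String) (lab : String) (k : Nat) (hk : k < nX.length) :
    PySem.List.pyGetD (nX.map (fun n => (lab ++ n, pvD))) (k : Int) ("", PySem.Dict.empty) = (lab ++ nX[k], pvD) := by
  rw [PySem.List.pyGetD_natCast, List.getD_eq_getElem _ _ (by simpa using hk)]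
  simp

set_option maxHeartbeats 2000000 in
theorem pvA_main (nA nB : List String) (la lb : String) :
    (PySem.List.enumerate (nA.map (fun n => ("" ++ n, pvD)))).foldl
      (fun conn_lst ia =>
        (PySem.List.enumerate (nB.map (fun n => ("" ++ n, pvD)))).foldl
          (fun conn_lst jb =>
            if (pvSplit ia.2.1).length > (pvSplit jb.2.1).length then
              if (pvSplit ia.2.1).contains (PySem.List.pyGetD (pvSplit jb.2.1) 0 "") then
                conn_lst ++ [((PySem.List.pyGetD (nA.map (fun n => (la ++ n, pvD))) ia.1 ("", PySem.Dict.empty)).1,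
                              (PySem.List.pyGetD (nB.map (fun n => (lb ++ n, pvD))) jb.1 ("", PySem.Dict.empty)).1)]
              else conn_lst
            else if (pvSplit jb.2.1).length > (pvSplit ia.2.1).length then
              if (pvSplit jb.2.1).contains (PySem.List.pyGetD (pvSplit ia.2.1) 0 "") then
                conn_lst ++ [((PySem.List.pyGetD (nA.map (fun n => (la ++ n, pvD))) ia.1 ("", PySem.Dict.empty)).1,
                              (PySem.List.pyGetD (nB.map (fun n => (lb ++ n, pvD))) jb.1 ("", PySem.Dict.empty)).1)]
              else conn_lst
            else conn_lst) conn_lst) [] = pvNF la lb nA nB := by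
  have hempty : ∀ (nX : List String), nX.map (fun n => ("" ++ n, pvD)) = nX.map (fun n => (n, pvD)) := by
    intro nX; apply List.map_congr_left; intro a _; simp
  rw [hempty, hempty]
  rw [PySem.List.foldl_congr_mem _ _
      (fun conn_lst ia => conn_lst ++
        ((PySem.List.enumerate (nB.map (fun n => (n, pvD)))).filter (fun jb => pvCond ia.2.1 jb.2.1)).map
          (fun jb => (la ++ ia.2.1, lb ++ jb.2.1))) _ ?_]
  · rw [PySem.List.foldl_append_eq_flatMap, List.nil_append]
    refine Eq.trans (pv_enum_flatMap (nA.map (fun n => (n, pvD)))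
      (fun x => ((PySem.List.enumerate (nB.map (fun n => (n, pvD)))).filter
          (fun jb => pvCond x.1 jb.2.1)).map (fun jb => (la ++ x.1, lb ++ jb.2.1)))) ?_
    rw [List.flatMap_map]
    unfold pvNF
    apply pv_flatMap_congr
    intro a _
    refine Eq.trans (pv_enum_filter_map (nB.map (fun n => (n, pvD)))
      (fun y => pvCond a y.1) (fun y => (la ++ a, lb ++ y.1))) ?_
    rw [List.filter_map, List.map_map]
    rfl
  · intro acc ia hia
    obtain ⟨k, hk, hia⟩ := (PySem.List.mem_enumerate_iff _ _ _).mp hia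
    subst hia
    have hk' : k < nA.length := by simpa using hk
    simp only [zero_add, List.getElem_map]
    have hstep := PySem.List.foldl_congr_mem (PySem.List.enumerate (nB.map (fun n => (n, pvD))))
      (f := fun conn_lst jb =>
            if (pvSplit (nA[k]'hk')).length > (pvSplit jb.2.1).length then
              if (pvSplit (nA[k]'hk')).contains (PySem.List.pyGetD (pvSplit jb.2.1) 0 "") then
                conn_lst ++ [((PySem.List.pyGetD (nA.map (fun n => (la ++ n, pvD))) (k : Int) ("", PySem.Dict.empty)).1,
                              (PySem.List.pyGetD (nB.map (fun n => (lb ++ n, pvD))) jb.1 ("", PySem.Dict.empty)).1)]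
              else conn_lst
            else if (pvSplit jb.2.1).length > (pvSplit (nA[k]'hk')).length then
              if (pvSplit jb.2.1).contains (PySem.List.pyGetD (pvSplit (nA[k]'hk')) 0 "") then
                conn_lst ++ [((PySem.List.pyGetD (nA.map (fun n => (la ++ n, pvD))) (k : Int) ("", PySem.Dict.empty)).1,
                              (PySem.List.pyGetD (nB.map (fun n => (lb ++ n, pvD))) jb.1 ("", PySem.Dict.empty)).1)]
              else conn_lst
            else conn_lst)
      (g := fun cl jb => if pvCond (nA[k]'hk') jb.2.1 then
          cl ++ [(la ++ nA[k]'hk', lb ++ jb.2.1)] else cl) acc ?_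
    rw [hstep]
    exact PySem.List.foldl_append_if _ _ _ _
    intro acc2 jb hjb
    obtain ⟨t, ht, hjb⟩ := (PySem.List.mem_enumerate_iff _ _ _).mp hjb
    subst hjb
    have ht' : t < nB.length := by simpa using ht
    simp only [zero_add, List.getElem_map]
    rw [pv_lookup nA la k hk', pv_lookup nB lb t ht']
    simp only [pvCond]
    split_ifs <;> first | rfl | exact ‹False›.elim

theorem pvA_eq_NF (conns_a conns_b : List (List String)) (a_idx b_idx : Int × Int) :
    cross_conn_py conns_a conns_b a_idx b_idx =
    pvNF (pvFmtG a_idx.1 ++ "_" ++ pvFmtG a_idx.2 ++ "!") (pvFmtG b_idx.1 ++ "_" ++ pvFmtG b_idx.2 ++ "!")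
      (conns_a.flatMap (fun c => c)) (conns_b.flatMap (fun c => c)) := by
  simp only [cross_conn_py]
  rw [PySem.List.foldl_prod_mk (f := fun acc conn => acc ++ pvNodeLst conn "")
        (g := fun acc conn => acc ++ pvNodeLst conn (pvFmtG a_idx.1 ++ "_" ++ pvFmtG a_idx.2 ++ "!")),
      PySem.List.foldl_prod_mk (f := fun acc conn => acc ++ pvNodeLst conn "")
        (g := fun acc conn => acc ++ pvNodeLst conn (pvFmtG b_idx.1 ++ "_" ++ pvFmtG b_idx.2 ++ "!"))]
  simp only [PySem.List.foldl_append_eq_flatMap, List.nil_append]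
  rw [pv_nodes_eq, pv_nodes_eq, pv_nodes_eq conns_a "", pv_nodes_eq conns_b ""]
  exact pvA_main _ _ _ _

-- ---- B side ----
def pvASplits (nA : List String) : List (List String) := nA.map (fun node => pvSplit node)

def pvIdx (nA : List String) : PySem.Dict String (List Int) × PySem.Dict String (List Int) :=
  (PySem.List.enumerate (pvASplits nA)).foldl
      (fun st ip =>
        ((PySem.List.dedup ip.2).foldl (fun d tok => d.modify tok [] (· ++ [ip.1])) st.1,
         st.2.modify (PySem.List.pyGetD ip.2 0 "") [] (· ++ [ip.1])))
      (PySem.Dict.empty, PySem.Dict.empty)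

def pvStep (nA : List String) (m : List (List Int)) (jn : Int × String) : List (List Int) :=
  let parts := pvSplit jn.2
  let lb := parts.length
  let m := ((pvIdx nA).1.getD (PySem.List.pyGetD parts 0 "") []).foldl
      (fun m i => if lb < (PySem.List.pyGetD (pvASplits nA) i []).length
                  then PySem.List.pySetD m i (PySem.List.pyGetD m i [] ++ [jn.1]) else m) m
  (PySem.List.dedup parts).foldl
      (fun m tok => ((pvIdx nA).2.getD tok []).foldl
          (fun m i => if (PySem.List.pyGetD (pvASplits nA) i []).length < lb
                      then PySem.List.pySetD m i (PySem.List.pyGetD m i [] ++ [jn.1]) else m) m) m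

def pvBmain (la lb : String) (nA nB : List String) : List (String × String) :=
  let mtchs := (PySem.List.enumerate nB).foldl (pvStep nA) (nA.map (fun _ => []))
  (PySem.List.enumerate mtchs).flatMap
    (fun ijs => ijs.2.map (fun j => (la ++ PySem.List.pyGetD nA ijs.1 "", lb ++ PySem.List.pyGetD nB j "")))

theorem pvB_restate (conns_a conns_b : List (List String)) (a_idx b_idx : Int × Int) :
    cross_conn_py_alt conns_a conns_b a_idx b_idx =
      pvBmain (pvFmtG a_idx.1 ++ "_" ++ pvFmtG a_idx.2 ++ "!") (pvFmtG b_idx.1 ++ "_" ++ pvFmtG b_idx.2 ++ "!")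
        (conns_a.flatMap (fun c => c)) (conns_b.flatMap (fun c => c)) := rfl

-- the two bucket lists
def pvMB (nA : List String) (c : String) : List Int :=
  ((PySem.List.enumerate (pvASplits nA)).filter (fun ip => decide (c ∈ ip.2))).map (fun p => p.1)
def pvFB (nA : List String) (c : String) : List Int :=
  ((PySem.List.enumerate (pvASplits nA)).filter (fun ip => PySem.List.pyGetD ip.2 0 "" == c)).map (fun p => p.1)

theorem pv_foldl_flatMap {α β σ : Type} (l : List α) (g : α → List β) (f : σ → β → σ) (a : σ) :
    (l.flatMap g).foldl f a = l.foldl (fun a x => (g x).foldl f a) a := by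
  induction l generalizing a with
  | nil => rfl
  | cons x xs ih => simp [List.flatMap_cons, List.foldl_append, ih]

theorem pv_filter_beq_of_nodup (l : List String) (c : String) (h : l.Nodup) :
    l.filter (fun t => t == c) = if c ∈ l then [c] else [] := by
  induction l with
  | nil => simp
  | cons x xs ih =>
    rcases List.nodup_cons.mp h with ⟨hx, hnd⟩
    by_cases hxc : x = c
    · subst hxc
      simp [ih hnd, hx]
    · simp only [List.filter_cons]
      have : (x == c) = false := by simp [hxc]
      rw [this]
      simp only [Bool.false_eq_true, if_false]
      rw [ih hnd]
      by_cases hmem : c ∈ xs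
      · simp [hmem, List.mem_cons]
      · simp [hmem, List.mem_cons, Ne.symm hxc]

theorem pv_pairs_char (E : List (Int × List String)) (c : String) :
    ((E.flatMap (fun ip => (PySem.List.dedup ip.2).map (fun t => (t, ip.1)))).filter
        (fun p => p.1 == c)).map (fun p => p.2) =
      (E.filter (fun ip => decide (c ∈ ip.2))).map (fun p => p.1) := by
  induction E with
  | nil => rfl
  | cons ip E ih =>
    simp only [List.flatMap_cons, List.filter_append, List.map_append, ih, List.filter_cons]
    rw [List.filter_map, List.map_map]
    have : ((fun p => p.1 == c) ∘ fun t => (t, ip.1)) = fun t => t == c := rfl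
    rw [this, pv_filter_beq_of_nodup _ _ (PySem.List.nodup_dedup ip.2)]
    by_cases hmem : c ∈ ip.2
    · have : c ∈ PySem.List.dedup ip.2 := (PySem.List.mem_dedup _ _).mpr hmem
      simp [hmem]
    · have : c ∉ PySem.List.dedup ip.2 := fun h => hmem ((PySem.List.mem_dedup _ _).mp h)
      simp [hmem]

theorem pvIdx_fst_getD (nA : List String) (c : String) :
    (pvIdx nA).1.getD c [] = pvMB nA c := by
  unfold pvIdx
  have hsplit := PySem.List.foldl_prod_mk
      (f := fun (d : PySem.Dict String (List Int)) (ip : Int × List String) =>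
        (PySem.List.dedup ip.2).foldl (fun d tok => d.modify tok [] (· ++ [ip.1])) d)
      (g := fun (d : PySem.Dict String (List Int)) (ip : Int × List String) =>
        d.modify (PySem.List.pyGetD ip.2 0 "") [] (· ++ [ip.1]))
      (l := PySem.List.enumerate (pvASplits nA)) (a := PySem.Dict.empty) (b := PySem.Dict.empty)
  rw [hsplit]
  show ((PySem.List.enumerate (pvASplits nA)).foldl
      (fun d ip => (PySem.List.dedup ip.2).foldl (fun d tok => d.modify tok [] (· ++ [ip.1])) d)
      PySem.Dict.empty).getD c [] = _
  have h1 : ∀ (d : PySem.Dict String (List Int)) (ip : Int × List String),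
      (PySem.List.dedup ip.2).foldl (fun d tok => d.modify tok [] (· ++ [ip.1])) d =
      ((PySem.List.dedup ip.2).map (fun t => (t, ip.1))).foldl (fun d p => d.modify p.1 [] (· ++ [p.2])) d := by
    intro d ip; rw [List.foldl_map]
  rw [PySem.List.foldl_congr_mem _ _ _ _ (fun d ip _ => h1 d ip)]
  have hfm := pv_foldl_flatMap (l := PySem.List.enumerate (pvASplits nA))
      (g := fun ip : Int × List String => (PySem.List.dedup ip.2).map (fun t => (t, ip.1)))
      (f := fun (d : PySem.Dict String (List Int)) (p : String × Int) => d.modify p.1 [] (· ++ [p.2]))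
      (a := PySem.Dict.empty)
  rw [← hfm]
  rw [PySem.Dict.getD_foldl_modify_append]
  rw [PySem.Dict.getD_empty, List.nil_append]
  exact pv_pairs_char _ c

theorem pvIdx_snd_getD (nA : List String) (c : String) :
    (pvIdx nA).2.getD c [] = pvFB nA c := by
  unfold pvIdx
  have hsplit := PySem.List.foldl_prod_mk
      (f := fun (d : PySem.Dict String (List Int)) (ip : Int × List String) =>
        (PySem.List.dedup ip.2).foldl (fun d tok => d.modify tok [] (· ++ [ip.1])) d)
      (g := fun (d : PySem.Dict String (List Int)) (ip : Int × List String) =>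
        d.modify (PySem.List.pyGetD ip.2 0 "") [] (· ++ [ip.1]))
      (l := PySem.List.enumerate (pvASplits nA)) (a := PySem.Dict.empty) (b := PySem.Dict.empty)
  rw [hsplit]
  show ((PySem.List.enumerate (pvASplits nA)).foldl
      (fun d ip => d.modify (PySem.List.pyGetD ip.2 0 "") [] (· ++ [ip.1])) PySem.Dict.empty).getD c [] = _
  have hfm := List.foldl_map (f := fun ip : Int × List String => (PySem.List.pyGetD ip.2 0 "", ip.1))
      (g := fun (d : PySem.Dict String (List Int)) (p : String × Int) => d.modify p.1 [] (· ++ [p.2]))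
      (l := PySem.List.enumerate (pvASplits nA)) (init := PySem.Dict.empty)
  rw [← hfm]
  rw [PySem.Dict.getD_foldl_modify_append, PySem.Dict.getD_empty, List.nil_append]
  rw [List.filter_map, List.map_map]
  rfl

theorem pv_enum_filter_fst_mem (xs : List (List String)) (p : Int × List String → Bool) (x : Int) :
    x ∈ ((PySem.List.enumerate xs).filter p).map (fun q => q.1) ↔
      ∃ k : Nat, k < xs.length ∧ x = (k : Int) ∧ p ((k : Int), xs.getD k []) = true := by
  rw [List.mem_map]
  constructor
  · rintro ⟨q, hq, rfl⟩
    rw [List.mem_filter] at hq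
    obtain ⟨hqe, hp⟩ := hq
    obtain ⟨k, hk, rfl⟩ := (PySem.List.mem_enumerate_iff _ _ _).mp hqe
    refine ⟨k, hk, by simp, ?_⟩
    rwa [List.getD_eq_getElem _ _ hk, ← zero_add (k : Int)]
  · rintro ⟨k, hk, rfl, hp⟩
    refine ⟨((k : Int), xs.getD k []), ?_, rfl⟩
    rw [List.mem_filter]
    refine ⟨?_, hp⟩
    rw [PySem.List.mem_enumerate_iff]
    exact ⟨k, hk, by rw [List.getD_eq_getElem _ _ hk, zero_add]⟩

theorem pv_bucket_nodup (xs : List (List String)) (p : Int × List String → Bool) :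
    (((PySem.List.enumerate xs).filter p).map (fun q => q.1)).Nodup := by
  have h1 := PySem.List.pairwise_lt_enumerate xs 0
  have h2 := List.Pairwise.filter (R := fun q q' : Int × List String => q.1 < q'.1) p h1
  have h3 : (((PySem.List.enumerate xs).filter p).map (fun q => q.1)).Pairwise (· < ·) :=
    List.pairwise_map.mpr h2
  exact h3.imp ne_of_lt

-- the conditional-append fold over a Nodup list of in-range indices (shared by both bucket passes)
theorem pv_append_fold (q : Int → Prop) [DecidablePred q] (j : Int) :
    ∀ (ts : List Int) (m : List (List Int)), ts.Nodup →
      (∀ i ∈ ts, ∃ k : Nat, i = (k : Int) ∧ k < m.length) →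
      (ts.foldl (fun m i => if q i then PySem.List.pySetD m i (PySem.List.pyGetD m i [] ++ [j]) else m) m).length
        = m.length ∧
      ∀ n : Nat, n < m.length →
        PySem.List.pyGetD
            (ts.foldl (fun m i => if q i then PySem.List.pySetD m i (PySem.List.pyGetD m i [] ++ [j]) else m) m)
            (n : Int) [] =
          PySem.List.pyGetD m (n : Int) [] ++ (if (n : Int) ∈ ts ∧ q (n : Int) then [j] else []) := by
  intro ts
  induction ts with
  | nil => intro m _ _; simp
  | cons i ts ih =>
    intro m hnd hin
    obtain ⟨k0, rfl, hk0⟩ := hin i (List.mem_cons_self)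
    rcases List.nodup_cons.mp hnd with ⟨hnotin, hnd'⟩
    set m1 := if q (k0 : Int) then PySem.List.pySetD m (k0 : Int) (PySem.List.pyGetD m (k0 : Int) [] ++ [j]) else m with hm1
    have hlen1 : m1.length = m.length := by
      rw [hm1]; split <;> simp
    have hin1 : ∀ i ∈ ts, ∃ k : Nat, i = (k : Int) ∧ k < m1.length := by
      intro i hi; obtain ⟨k, rfl, hk⟩ := hin i (List.mem_cons_of_mem _ hi); exact ⟨k, rfl, by omega⟩
    obtain ⟨ihlen, ihpt⟩ := ih m1 hnd' hin1
    constructor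
    · rw [List.foldl_cons, ← hm1]; exact ihlen.trans hlen1
    · intro n hn
      rw [List.foldl_cons, ← hm1]
      rw [ihpt n (by omega)]
      have hget1 : PySem.List.pyGetD m1 (n : Int) [] =
          PySem.List.pyGetD m (n : Int) [] ++ (if n = k0 ∧ q (k0 : Int) then [j] else []) := by
        rw [hm1]
        by_cases hq : q (k0 : Int)
        · rw [if_pos hq, PySem.List.pyGetD_pySetD_natCast _ _ _ _ _ hk0]
          by_cases hnk : n = k0
          · subst hnk; simp [hq]
          · simp [hnk]
        · simp [hq]
      rw [hget1]
      by_cases hmem : (n : Int) ∈ ts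
      · have hnk : ¬ n = k0 := by
          rintro rfl; exact hnotin hmem
        have hc : ((n : Int) ∈ (k0 : Int) :: ts) := List.mem_cons_of_mem _ hmem
        by_cases hq : q (n : Int)
        · simp [hnk, hmem, hq, hc]
        · simp [hnk, hmem, hq, hc]
      · by_cases hnk : n = k0
        · subst hnk
          have hc : ((n : Int) ∈ (n : Int) :: ts) := List.mem_cons_self
          by_cases hq : q (n : Int)
          · simp [hmem, hq, hc]
          · simp [hmem, hq]
        · have hc : ¬ ((n : Int) ∈ (k0 : Int) :: ts) := by
            rw [List.mem_cons]
            rintro (h | h)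
            · exact hnk (by exact_mod_cast h)
            · exact hmem h
          simp [hnk, hmem, hc]

theorem pv_splits_getD (nA : List String) (n : Nat) (hn : n < nA.length) :
    PySem.List.pyGetD (pvASplits nA) (n : Int) [] = pvSplit (nA.getD n "") := by
  rw [PySem.List.pyGetD_natCast]
  unfold pvASplits
  rw [List.getD_eq_getElem _ _ (by simpa using hn), List.getElem_map, List.getD_eq_getElem _ _ hn]

theorem pv_getD_splits (nA : List String) (n : Nat) (hn : n < nA.length) :
    (pvASplits nA).getD n [] = pvSplit (nA.getD n "") := by
  rw [← pv_splits_getD nA n hn, PySem.List.pyGetD_natCast]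

theorem pv_MB_elems (nA : List String) (c : String) :
    ∀ i ∈ pvMB nA c, ∃ k : Nat, i = (k : Int) ∧ k < nA.length := by
  intro i hi
  obtain ⟨k, hk, rfl, _⟩ := (pv_enum_filter_fst_mem _ _ _).mp hi
  exact ⟨k, rfl, by simpa [pvASplits] using hk⟩

theorem pv_FB_elems (nA : List String) (c : String) :
    ∀ i ∈ pvFB nA c, ∃ k : Nat, i = (k : Int) ∧ k < nA.length := by
  intro i hi
  obtain ⟨k, hk, rfl, _⟩ := (pv_enum_filter_fst_mem _ _ _).mp hi
  exact ⟨k, rfl, by simpa [pvASplits] using hk⟩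

theorem pv_mem_MB (nA : List String) (c : String) (n : Nat) (hn : n < nA.length) :
    ((n : Int) ∈ pvMB nA c) ↔ c ∈ pvSplit (nA.getD n "") := by
  rw [pvMB, pv_enum_filter_fst_mem]
  constructor
  · rintro ⟨k, hk, hkn, hp⟩
    have hkn' : n = k := by exact_mod_cast hkn
    subst hkn'
    have h2 : ((n : Int), (pvASplits nA).getD n []).2 = pvSplit (nA.getD n "") := pv_getD_splits nA n hn
    exact h2 ▸ of_decide_eq_true hp
  · intro hmem
    have h2 : ((n : Int), (pvASplits nA).getD n []).2 = pvSplit (nA.getD n "") := pv_getD_splits nA n hn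
    exact ⟨n, by simpa [pvASplits] using hn, rfl, decide_eq_true (by rw [h2]; exact hmem)⟩

theorem pv_mem_FB (nA : List String) (c : String) (n : Nat) (hn : n < nA.length) :
    ((n : Int) ∈ pvFB nA c) ↔ PySem.List.pyGetD (pvSplit (nA.getD n "")) 0 "" = c := by
  rw [pvFB, pv_enum_filter_fst_mem]
  constructor
  · rintro ⟨k, hk, hkn, hp⟩
    have hkn' : n = k := by exact_mod_cast hkn
    subst hkn'
    have h2 : ((n : Int), (pvASplits nA).getD n []).2 = pvSplit (nA.getD n "") := pv_getD_splits nA n hn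
    exact h2 ▸ eq_of_beq hp
  · intro heq
    refine ⟨n, by simpa [pvASplits] using hn, rfl, ?_⟩
    have h2 : ((n : Int), (pvASplits nA).getD n []).2 = pvSplit (nA.getD n "") := pv_getD_splits nA n hn
    rw [h2, heq]
    simp

theorem pv_first_pass (nA : List String) (lbn : Nat) (j : Int) :
    ∀ (ts : List String), ts.Nodup → ∀ (m : List (List Int)), m.length = nA.length →
      (ts.foldl (fun m tok => (pvFB nA tok).foldl
          (fun m i => if (PySem.List.pyGetD (pvASplits nA) i []).length < lbn
                      then PySem.List.pySetD m i (PySem.List.pyGetD m i [] ++ [j]) else m) m) m).length = nA.length ∧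
      ∀ n : Nat, n < nA.length →
        PySem.List.pyGetD (ts.foldl (fun m tok => (pvFB nA tok).foldl
            (fun m i => if (PySem.List.pyGetD (pvASplits nA) i []).length < lbn
                        then PySem.List.pySetD m i (PySem.List.pyGetD m i [] ++ [j]) else m) m) m) (n : Int) [] =
          PySem.List.pyGetD m (n : Int) [] ++
            (if PySem.List.pyGetD (pvSplit (nA.getD n "")) 0 "" ∈ ts ∧ (pvSplit (nA.getD n "")).length < lbn
             then [j] else []) := by
  intro ts
  induction ts with
  | nil => intro _ m hm; refine ⟨hm, ?_⟩; intro n hn; simp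
  | cons t ts ih =>
    intro hnd m hm
    rcases List.nodup_cons.mp hnd with ⟨hnotin, hnd'⟩
    obtain ⟨hlen1, hpt1⟩ := pv_append_fold
      (fun i => (PySem.List.pyGetD (pvASplits nA) i []).length < lbn) j (pvFB nA t) m
      (pv_bucket_nodup (pvASplits nA) _)
      (by
        intro i hi
        obtain ⟨k, rfl, hk⟩ := pv_FB_elems nA t i hi
        exact ⟨k, rfl, by omega⟩)
    obtain ⟨ihlen, ihpt⟩ := ih hnd'
      ((pvFB nA t).foldl
        (fun m i => if (PySem.List.pyGetD (pvASplits nA) i []).length < lbn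
                    then PySem.List.pySetD m i (PySem.List.pyGetD m i [] ++ [j]) else m) m)
      (hlen1.trans hm)
    refine ⟨by rw [List.foldl_cons]; exact ihlen, ?_⟩
    intro n hn
    rw [List.foldl_cons, ihpt n hn, hpt1 n (by omega), List.append_assoc]
    congr 1
    have hA : ((n : Int) ∈ pvFB nA t) ↔ PySem.List.pyGetD (pvSplit (nA.getD n "")) 0 "" = t :=
      pv_mem_FB nA t n hn
    rw [pv_splits_getD nA n hn]
    by_cases h2 : (pvSplit (nA.getD n "")).length < lbn
    · by_cases h1 : PySem.List.pyGetD (pvSplit (nA.getD n "")) 0 "" = t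
      · have hnotm : PySem.List.pyGetD (pvSplit (nA.getD n "")) 0 "" ∉ ts := h1 ▸ hnotin
        rw [if_pos ⟨hA.mpr h1, h2⟩, if_neg (fun h => hnotm h.1),
            if_pos ⟨List.mem_cons.mpr (Or.inl h1), h2⟩, List.append_nil]
      · by_cases hmem : PySem.List.pyGetD (pvSplit (nA.getD n "")) 0 "" ∈ ts
        · rw [if_neg (fun h => h1 (hA.mp h.1)), if_pos ⟨hmem, h2⟩,
              if_pos ⟨List.mem_cons.mpr (Or.inr hmem), h2⟩, List.nil_append]
        · rw [if_neg (fun h => h1 (hA.mp h.1)), if_neg (fun h => hmem h.1),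
              if_neg (fun h => (List.mem_cons.mp h.1).elim h1 hmem)]
          rfl
    · rw [if_neg (fun h => h2 h.2), if_neg (fun h => h2 h.2), if_neg (fun h => h2 h.2)]
      rfl

theorem pv_step_char (nA : List String) (b : String) (j : Int) (m : List (List Int)) (hm : m.length = nA.length) :
    (pvStep nA m (j, b)).length = nA.length ∧
    ∀ n : Nat, n < nA.length →
      PySem.List.pyGetD (pvStep nA m (j, b)) (n : Int) [] =
        PySem.List.pyGetD m (n : Int) [] ++ (if pvCond (nA.getD n "") b = true then [j] else []) := by
  obtain ⟨hlen1, hpt1⟩ := pv_append_fold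
    (fun i => (pvSplit b).length < (PySem.List.pyGetD (pvASplits nA) i []).length) j
    (pvMB nA (PySem.List.pyGetD (pvSplit b) 0 "")) m
    (pv_bucket_nodup (pvASplits nA) _)
    (by
      intro i hi
      obtain ⟨k, rfl, hk⟩ := pv_MB_elems nA _ i hi
      exact ⟨k, rfl, by omega⟩)
  obtain ⟨hlen2, hpt2⟩ := pv_first_pass nA (pvSplit b).length j (PySem.List.dedup (pvSplit b))
    (PySem.List.nodup_dedup _)
    ((pvMB nA (PySem.List.pyGetD (pvSplit b) 0 "")).foldl
      (fun m i => if (pvSplit b).length < (PySem.List.pyGetD (pvASplits nA) i []).length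
                  then PySem.List.pySetD m i (PySem.List.pyGetD m i [] ++ [j]) else m) m)
    (hlen1.trans hm)
  have hstep : pvStep nA m (j, b) =
      (PySem.List.dedup (pvSplit b)).foldl (fun m tok => (pvFB nA tok).foldl
          (fun m i => if (PySem.List.pyGetD (pvASplits nA) i []).length < (pvSplit b).length
                      then PySem.List.pySetD m i (PySem.List.pyGetD m i [] ++ [j]) else m) m)
        ((pvMB nA (PySem.List.pyGetD (pvSplit b) 0 "")).foldl
          (fun m i => if (pvSplit b).length < (PySem.List.pyGetD (pvASplits nA) i []).length
                      then PySem.List.pySetD m i (PySem.List.pyGetD m i [] ++ [j]) else m) m) := by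
    simp only [pvStep, pvIdx_fst_getD, pvIdx_snd_getD]
  rw [hstep]
  refine ⟨hlen2, ?_⟩
  intro n hn
  rw [hpt2 n hn, hpt1 n (by omega), List.append_assoc]
  congr 1
  have hP := pv_mem_MB nA (PySem.List.pyGetD (pvSplit b) 0 "") n hn
  rw [pv_splits_getD nA n hn]
  by_cases hlt : (pvSplit b).length < (pvSplit (nA.getD n "")).length
  · by_cases hs0 : PySem.List.pyGetD (pvSplit b) 0 "" ∈ pvSplit (nA.getD n "")
    · rw [if_pos ⟨hP.mpr hs0, hlt⟩, if_neg (fun h => absurd h.2 (by omega)),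
          if_pos (by simp only [pvCond]; rw [if_pos hlt]; exact List.elem_eq_true_of_mem hs0)]
      simp
    · rw [if_neg (fun h => hs0 (hP.mp h.1)), if_neg (fun h => absurd h.2 (by omega)),
          if_neg (by simp only [pvCond]; rw [if_pos hlt]; simpa using hs0)]
      rfl
  · by_cases hgt : (pvSplit (nA.getD n "")).length < (pvSplit b).length
    · by_cases hp0 : PySem.List.pyGetD (pvSplit (nA.getD n "")) 0 "" ∈ pvSplit b
      · rw [if_neg (fun h => hlt h.2), if_pos ⟨(PySem.List.mem_dedup _ _).mpr hp0, hgt⟩,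
            if_pos (by simp only [pvCond]; rw [if_neg hlt, if_pos hgt]; exact List.elem_eq_true_of_mem hp0)]
        simp
      · rw [if_neg (fun h => hlt h.2), if_neg (fun h => hp0 ((PySem.List.mem_dedup _ _).mp h.1)),
            if_neg (by simp only [pvCond]; rw [if_neg hlt, if_pos hgt]; simpa using hp0)]
        rfl
    · rw [if_neg (fun h => hlt h.2), if_neg (fun h => hgt h.2),
          if_neg (by simp only [pvCond]; rw [if_neg hlt, if_neg hgt]; simp)]
      rfl

theorem pv_fold_char (nA : List String) : ∀ (bs : List String) (s : Int) (m : List (List Int)),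
    m.length = nA.length →
    ((PySem.List.enumerate bs s).foldl (pvStep nA) m).length = nA.length ∧
    ∀ n : Nat, n < nA.length →
      PySem.List.pyGetD ((PySem.List.enumerate bs s).foldl (pvStep nA) m) (n : Int) [] =
        PySem.List.pyGetD m (n : Int) [] ++
          (((PySem.List.enumerate bs s).filter (fun jb => pvCond (nA.getD n "") jb.2)).map (fun p => p.1)) := by
  intro bs
  induction bs with
  | nil =>
    intro s m hm
    refine ⟨by simpa using hm, ?_⟩
    intro n hn
    simp [PySem.List.enumerate]
  | cons x bs ih =>
    intro s m hm
    rw [PySem.List.enumerate_cons]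
    obtain ⟨slen, spt⟩ := pv_step_char nA x s m hm
    obtain ⟨ihlen, ihpt⟩ := ih (s + 1) (pvStep nA m (s, x)) slen
    refine ⟨by rw [List.foldl_cons]; exact ihlen, ?_⟩
    intro n hn
    rw [List.foldl_cons, ihpt n hn, spt n hn, List.filter_cons, List.append_assoc]
    congr 1
    split_ifs <;> simp

def pvBody (la lb : String) (nA nB : List String) (i : Int) : List (String × String) :=
  (((PySem.List.enumerate nB).filter (fun jb => pvCond (PySem.List.pyGetD nA i "") jb.2)).map (fun p => p.1)).map
    (fun j => (la ++ PySem.List.pyGetD nA i "", lb ++ PySem.List.pyGetD nB j ""))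

theorem pv_body_eq (la lb : String) (nA nB : List String) (k : Nat) (_hk : k < nA.length) :
    pvBody la lb nA nB (k : Int) =
      (nB.filter (fun b => pvCond (nA.getD k "") b)).map (fun b => (la ++ nA.getD k "", lb ++ b)) := by
  unfold pvBody
  rw [PySem.List.pyGetD_natCast, List.map_map]
  rw [List.map_congr_left (g := fun jb : Int × String => (la ++ nA.getD k "", lb ++ jb.2)) ?_]
  · exact pv_enum_filter_map nB (fun b => pvCond (nA.getD k "") b)
      (fun b => (la ++ nA.getD k "", lb ++ b))
  · intro jb hjb
    have hjb' := List.mem_of_mem_filter hjb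
    obtain ⟨t, ht, rfl⟩ := (PySem.List.mem_enumerate_iff _ _ _).mp hjb'
    simp only [Function.comp_apply, zero_add]
    rw [PySem.List.pyGetD_natCast, List.getD_eq_getElem _ _ ht]

theorem pvBmain_eq_NF (la lb : String) (nA nB : List String) :
    pvBmain la lb nA nB = pvNF la lb nA nB := by
  obtain ⟨hlen, hpt⟩ := pv_fold_char nA nB 0 (nA.map (fun _ => ([] : List Int))) (by simp)
  have hinit : ∀ n : Nat, n < nA.length →
      PySem.List.pyGetD (nA.map (fun _ => ([] : List Int))) (n : Int) [] = [] := by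
    intro n hn
    rw [PySem.List.pyGetD_natCast, List.getD_eq_getElem _ _ (by simpa using hn), List.getElem_map]
  have hMn : ∀ n : Nat, n < nA.length →
      PySem.List.pyGetD ((PySem.List.enumerate nB).foldl (pvStep nA) (nA.map (fun _ => ([] : List Int)))) (n : Int) [] =
      ((PySem.List.enumerate nB).filter (fun jb => pvCond (nA.getD n "") jb.2)).map (fun p => p.1) := by
    intro n hn
    rw [hpt n hn, hinit n hn, List.nil_append]
  show (PySem.List.enumerate ((PySem.List.enumerate nB).foldl (pvStep nA) (nA.map (fun _ => ([] : List Int))))).flatMap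
      (fun ijs => ijs.2.map (fun j => (la ++ PySem.List.pyGetD nA ijs.1 "", lb ++ PySem.List.pyGetD nB j ""))) =
      pvNF la lb nA nB
  rw [pv_flatMap_congr (g := fun ijs => pvBody la lb nA nB ijs.1) ?_]
  · rw [← List.flatMap_map (fun p : Int × List Int => p.1) (pvBody la lb nA nB)]
    have hR : pvNF la lb nA nB =
        ((PySem.List.enumerate nA).map (fun p => p.1)).flatMap (pvBody la lb nA nB) := by
      rw [List.flatMap_map]
      unfold pvNF
      rw [← pv_enum_flatMap nA (fun a => (nB.filter (fun b => pvCond a b)).map (fun b => (la ++ a, lb ++ b)))]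
      apply pv_flatMap_congr
      intro ia hia
      obtain ⟨k, hk, rfl⟩ := (PySem.List.mem_enumerate_iff _ _ _).mp hia
      simp only [zero_add]
      rw [pv_body_eq la lb nA nB k hk, List.getD_eq_getElem _ _ hk]
    rw [hR, PySem.List.map_fst_enumerate, PySem.List.map_fst_enumerate, hlen]
  · intro ijs hijs
    obtain ⟨k, hk, rfl⟩ := (PySem.List.mem_enumerate_iff _ _ _).mp hijs
    have hk' : k < nA.length := by rw [← hlen]; exact hk
    simp only [zero_add]
    have hMk : ((PySem.List.enumerate nB).foldl (pvStep nA) (nA.map (fun _ => ([] : List Int))))[k] =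
        PySem.List.pyGetD ((PySem.List.enumerate nB).foldl (pvStep nA) (nA.map (fun _ => ([] : List Int)))) (k : Int) [] := by
      rw [PySem.List.pyGetD_natCast, List.getD_eq_getElem _ _ hk]
    rw [hMk, hMn k hk']
    unfold pvBody
    rw [PySem.List.pyGetD_natCast nA k ""]

theorem pvB_eq_NF (conns_a conns_b : List (List String)) (a_idx b_idx : Int × Int) :
    cross_conn_py_alt conns_a conns_b a_idx b_idx =
    pvNF (pvFmtG a_idx.1 ++ "_" ++ pvFmtG a_idx.2 ++ "!") (pvFmtG b_idx.1 ++ "_" ++ pvFmtG b_idx.2 ++ "!")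
      (conns_a.flatMap (fun c => c)) (conns_b.flatMap (fun c => c)) := by
  rw [pvB_restate]
  exact pvBmain_eq_NF _ _ _ _

-- ===== VERDICT (by name: the statement is the Claim_ definition above) =====
theorem cross_conn_py_spec : Claim_equal_cross_conn_py := by
  intro conns_a conns_b a_idx b_idx _
  unfold Spec_cross_conn_py
  rw [pvA_eq_NF, pvB_eq_NF]
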